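-- pv_equiv track=rewrite | github.com/aeyalcinoglu/rhirl | rhirl/preprocess/rhirl_data_prep_utils.py | get_historical_trajectories
-- ===== SOURCE A (Python) =====
-- from collections import defaultdict
--
-- def get_historical_trajectories(trajectories, times):
--     """
--     This is not H_tau, see find_valid_trajectories for that
--     This returns a aggregated dictionary of trajectories
--     Aggregated by time
--     """
--     historical_trajectories = defaultdict(list)
--     for i in range(len(trajectories)):
--         time = times[i]
--         trajectory = trajectories[i]
--         historical_trajectories[time].append(trajectory)
--     historical_trajectories = {
--         k: historical_trajectories[k] for k in sorted(historical_trajectories)}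
--
--     return historical_trajectories
-- ===== SOURCE B (Python) =====
-- def get_historical_trajectories(trajectories, times):
--     """Collect the times actually used, then for each distinct time in
--     sorted order gather the matching trajectories by a filtering pass."""
--     used = [times[i] for i in range(len(trajectories))]
--     return {t: [trajectories[i] for i in range(len(trajectories)) if used[i] == t]
--             for t in sorted(set(used))}
-- ===== Notes on version B (the rewrite author's own statement) =====
-- stated objective: alternative
-- what changed: Replaces A's defaultdict accumulation loop plus key-sort rebuild with a direct construction: collect the used times, then for each distinct time in sorted order gather its trajectories by a filtering pass over the indices.
-- outside the precondition, e.g. on get_historical_trajectories([[1], [2]], [7]): A raises IndexError, B raises IndexError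
import Mathlib
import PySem

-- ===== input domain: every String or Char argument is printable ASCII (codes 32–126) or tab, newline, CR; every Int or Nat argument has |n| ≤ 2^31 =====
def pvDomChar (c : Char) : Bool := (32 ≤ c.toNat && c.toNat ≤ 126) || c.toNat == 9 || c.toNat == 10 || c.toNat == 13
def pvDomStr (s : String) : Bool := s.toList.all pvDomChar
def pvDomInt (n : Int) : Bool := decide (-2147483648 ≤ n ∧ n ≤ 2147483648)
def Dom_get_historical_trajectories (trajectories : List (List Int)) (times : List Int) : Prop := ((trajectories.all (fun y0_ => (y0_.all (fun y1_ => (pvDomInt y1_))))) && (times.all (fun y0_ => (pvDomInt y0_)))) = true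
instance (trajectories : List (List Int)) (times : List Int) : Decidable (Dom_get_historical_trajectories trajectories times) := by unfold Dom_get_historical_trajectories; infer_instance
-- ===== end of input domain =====

-- B groups by a sorted-distinct-keys pass with per-key filtering instead of A's defaultdict
-- accumulation; equivalent return value on Pre_ (alternative decomposition, not claimed faster).

-- ===== PORT A =====
def get_historical_trajectories (trajectories : List (List Int)) (times : List Int) : List (Int × List (List Int)) :=
  -- defaultdict(list) loop: d[time].append(trajectory)
  let d : PySem.Dict Int (List (List Int)) :=
    (PySem.List.pyRange 0 (trajectories.length : Int) 1).foldl
      (fun d i =>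
        let time := PySem.List.pyGetD times i 0          -- times[i]; in range on Pre_
        let trajectory := PySem.List.pyGetD trajectories i []  -- trajectories[i]
        d.modify time [] (fun l => l ++ [trajectory]))
      PySem.Dict.empty
  -- {k: d[k] for k in sorted(d)}
  (PySem.List.sorted d.keys (fun k => k) false).map (fun k => (k, d.getD k []))

-- ===== PORT B =====
def get_historical_trajectories_alt (trajectories : List (List Int)) (times : List Int) : List (Int × List (List Int)) :=
  -- used = [times[i] for i in range(len(trajectories))]
  let used := (PySem.List.pyRange 0 (trajectories.length : Int) 1).map
    (fun i => PySem.List.pyGetD times i 0)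
  -- {t: [trajectories[i] for i in range(len(trajectories)) if used[i] == t] for t in sorted(set(used))}
  (PySem.List.sorted (PySem.Set.ofList used) (fun k => k) false).map
    (fun t => (t,
      ((PySem.List.pyRange 0 (trajectories.length : Int) 1).filter
          (fun i => PySem.List.pyGetD used i 0 == t)).map
        (fun i => PySem.List.pyGetD trajectories i [])))

-- ===== PRECONDITION & SPEC =====
-- Pre_ excludes exactly the inputs where A raises IndexError: times shorter than trajectories.
def Pre_get_historical_trajectories (trajectories : List (List Int)) (times : List Int) : Prop :=
  trajectories.length ≤ times.length
instance (trajectories : List (List Int)) (times : List Int) : Decidable (Pre_get_historical_trajectories trajectories times) := by unfold Pre_get_historical_trajectories; infer_instance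

def pvWitness_get_historical_trajectories : List (List Int) × List Int := ([[1], [2], [3]], [5, 3, 5])

def Spec_get_historical_trajectories (trajectories : List (List Int)) (times : List Int) (out : List (Int × List (List Int))) : Prop := out = get_historical_trajectories_alt trajectories times
instance (trajectories : List (List Int)) (times : List Int) (out : List (Int × List (List Int))) : Decidable (Spec_get_historical_trajectories trajectories times out) := by unfold Spec_get_historical_trajectories; infer_instance

-- ===== CLAIM (what is proved, stated in full; the proofs are below) =====
def Claim_equal_get_historical_trajectories : Prop := ∀ (trajectories : List (List Int)) (times : List Int), Dom_get_historical_trajectories trajectories times → Pre_get_historical_trajectories trajectories times → Spec_get_historical_trajectories trajectories times (get_historical_trajectories trajectories times)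

-- ===== LEMMAS AND PROOFS =====

theorem pv_main (tr : List (List Int)) (tm : List Int) :
    get_historical_trajectories tr tm = get_historical_trajectories_alt tr tm := by
  unfold get_historical_trajectories get_historical_trajectories_alt
  have hfold :
      (PySem.List.pyRange 0 (tr.length : Int) 1).foldl
        (fun d i => d.modify (PySem.List.pyGetD tm i 0) []
          (fun l => l ++ [PySem.List.pyGetD tr i []])) PySem.Dict.empty
      = ((PySem.List.pyRange 0 (tr.length : Int) 1).map
          (fun i => (PySem.List.pyGetD tm i 0, PySem.List.pyGetD tr i []))).foldl
          (fun d p => d.modify p.1 [] (fun l => l ++ [p.2])) PySem.Dict.empty := by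
    rw [List.foldl_map]
  have hkeys :
      ((PySem.List.pyRange 0 (tr.length : Int) 1).foldl
        (fun d i => d.modify (PySem.List.pyGetD tm i 0) []
          (fun l => l ++ [PySem.List.pyGetD tr i []])) PySem.Dict.empty).keys
      = PySem.Set.ofList ((PySem.List.pyRange 0 (tr.length : Int) 1).map
          (fun i => PySem.List.pyGetD tm i 0)) := by
    rw [PySem.Dict.keys_foldl_modify_key _ (fun i => PySem.List.pyGetD tm i 0) []
        (fun d i => fun l => l ++ [PySem.List.pyGetD tr i []])]
    simp [PySem.Set.update, ← PySem.Set.ofList_eq_foldl, PySem.Dict.empty, PySem.Dict.keys]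
  have hget : ∀ c,
      ((PySem.List.pyRange 0 (tr.length : Int) 1).foldl
        (fun d i => d.modify (PySem.List.pyGetD tm i 0) []
          (fun l => l ++ [PySem.List.pyGetD tr i []])) PySem.Dict.empty).getD c []
      = ((PySem.List.pyRange 0 (tr.length : Int) 1).filter
          (fun i => PySem.List.pyGetD tm i 0 == c)).map
          (fun i => PySem.List.pyGetD tr i []) := by
    intro c
    rw [hfold, PySem.Dict.getD_foldl_modify_append]
    simp [List.filter_map, List.map_map, Function.comp_def]
  simp only [hkeys]
  apply List.map_congr_left
  intro k hk
  rw [hget k]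
  congr 1
  apply congrArg
  apply List.filter_congr
  intro i hi
  rcases (PySem.List.mem_pyRange_one).1 hi with ⟨h0, hlt⟩
  lift i to ℕ using h0 with j
  rw [PySem.List.pyGetD_map_pyRange _ tr.length j 0 (by exact_mod_cast hlt)]

-- ===== VERDICT (by name: the statement is the Claim_ definition above) =====
theorem get_historical_trajectories_spec : Claim_equal_get_historical_trajectories := by
  intro tr tm _ _
  unfold Spec_get_historical_trajectories
  exact pv_main tr tm
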